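-- pv_equiv track=rewrite | github.com/OpenMDAO-Plugins/nastranwrapper | src/nastranwrapper/nastran_maker.py | _items_to_long_form
-- ===== SOURCE A (Python) =====
-- def _items_to_long_form(items, unique_int):
--     """Convert to Nastran long form.
--
--     This is a helper method to convert a list of items
--     to a list of strings that represent Nastran long form."""
--     if "*" not in items[0]:
--         items[0] = items[0].strip() + "*"
--
--     while len(items):
--         if items[-1] == "":
--             del items[-1]
--         else: break
--
--     # insert some continuations
--     divisions = 4
--     index = 1
--     while index < len(items)-divisions:
--         index += divisions
--         continuation = "*" + str(unique_int)
--         unique_int += 1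
--         items.insert(index, continuation)
--         items.insert(index, continuation)
--         index += 2
--
--     final = []
--     for index, item in enumerate(items):
--         if index % 6 == 0:
--             final.append(item.ljust(8))
--         else:
--             final[-1] += item.ljust(16)
--
--     return unique_int, final
-- ===== SOURCE B (Python) =====
-- def _items_to_long_form(items, unique_int):
--     """Convert to Nastran long form.
--
--     Single forward pass: builds the field list chunk by chunk (4 data fields
--     plus a doubled continuation marker per chunk) instead of inserting into
--     the middle of the list, then joins the fields into lines of 6."""
--     head = items[0] if "*" in items[0] else items[0].strip() + "*"
--     rest = items[1:]
--     while rest and rest[-1] == "":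
--         rest.pop()
--
--     fields = [head] + rest[:4]
--     pos = 4
--     while pos < len(rest):
--         cont = "*" + str(unique_int)
--         unique_int += 1
--         fields += [cont, cont] + rest[pos:pos + 4]
--         pos += 4
--
--     final = []
--     i = 0
--     while i < len(fields):
--         line = fields[i].ljust(8)
--         for f in fields[i + 1:i + 6]:
--             line += f.ljust(16)
--         final.append(line)
--         i += 6
--     return unique_int, final
-- ===== Notes on version B (the rewrite author's own statement) =====
-- stated objective: faster
-- what changed: Instead of repeatedly calling list.insert to splice doubled continuation markers into the middle of the list (each insert shifts the tail) and then grouping via enumerate with in-place final[-1] updates, B rebuilds the field list in one forward pass over 4-element chunks and joins lines of 6 by direct slicing.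
import Mathlib
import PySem

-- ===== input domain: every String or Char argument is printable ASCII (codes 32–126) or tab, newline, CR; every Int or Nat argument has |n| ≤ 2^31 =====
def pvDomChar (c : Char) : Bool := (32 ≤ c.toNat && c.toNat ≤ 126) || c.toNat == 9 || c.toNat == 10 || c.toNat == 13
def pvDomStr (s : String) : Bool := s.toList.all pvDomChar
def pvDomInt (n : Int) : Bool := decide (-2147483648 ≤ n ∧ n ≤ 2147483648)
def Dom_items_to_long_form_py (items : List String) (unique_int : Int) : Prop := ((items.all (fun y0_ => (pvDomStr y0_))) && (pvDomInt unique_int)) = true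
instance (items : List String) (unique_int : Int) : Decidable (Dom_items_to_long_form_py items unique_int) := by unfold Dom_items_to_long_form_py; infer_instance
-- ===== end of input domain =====

-- B rebuilds the field list in one forward pass (no mid-list insertions): objective 'faster'.
-- Python A mutates `items` in place; the equivalence proved here is about the RETURN value only.

-- shared string primitives, exact ports of Python's str concat / str.ljust
-- (String.mk/toList keep everything kernel-reducible; len = number of code points, as in Python)
def pyCat (a b : String) : String := String.ofList (a.toList ++ b.toList)
def pyLjust (s : String) (w : Nat) : String := String.ofList (s.toList ++ List.replicate (w - s.toList.length) ' ')

-- `while len(items): if items[-1] == "": del items[-1] else: break`  (items[-1] = getLast, list nonempty)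
def stripTrail (xs : List String) : List String :=
  if h : xs = [] then xs
  else if xs.getLast h = "" then stripTrail xs.dropLast else xs
termination_by xs.length
decreasing_by
  have : 0 < xs.length := List.length_pos_of_ne_nil h
  simp [List.length_dropLast]; omega

-- ===== PORT A =====
-- the `while index < len(items)-divisions` insertion loop (divisions = 4);
-- Python's index stays ≥ 1, carried as Nat; inserts happen at index+4 (index += 4 first)
def insLoopA (items : List String) (index : Nat) (u : Int) : Int × List String :=
  if h : index + 4 < items.length then
    let cont := pyCat "*" (PySem.Int.toStr u)
    let items1 := PySem.List.insert items ((index + 4 : Nat) : Int) cont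
    let items2 := PySem.List.insert items1 ((index + 4 : Nat) : Int) cont
    insLoopA items2 (index + 6) (u + 1)
  else (u, items)
termination_by items.length - index
decreasing_by
  simp [PySem.List.insert_natCast, List.length_insertIdx] at *
  omega

-- `for index, item in enumerate(items): …`; final[-1] += x on an empty final is
-- unreachable (index 0 always appends), getLastD "" covers that impossible case
def finStepA (final : List String) (i : Nat) (it : String) : List String :=
  if i % 6 = 0 then final ++ [pyLjust it 8]
  else final.dropLast ++ [pyCat (final.getLastD "") (pyLjust it 16)]

def finLoopA (xs : List String) : List String :=
  (xs.foldl (fun st it => (st.1 + 1, finStepA st.2 st.1 it)) ((0 : Nat), ([] : List String))).2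

def items_to_long_form_py (items : List String) (unique_int : Int) : Int × List String :=
  let i0 := items.headD ""                                   -- items[0]; [] raises IndexError, excluded by Pre_
  let i0 := if PySem.Str.isIn "*" i0 then i0 else pyCat (PySem.Str.strip i0) "*"
  let items := i0 :: items.tail                              -- items[0] = …
  let items := stripTrail items
  let r := insLoopA items 1 unique_int
  (r.1, finLoopA r.2)

-- ===== PORT B =====
-- `while pos < len(rest): … fields += [cont, cont] + rest[pos:pos+4]; pos += 4`
-- (rest[pos:pos+4] with 0 ≤ pos is exactly (rest.drop pos).take 4)
def chunkLoopB (rest : List String) (pos : Nat) (u : Int) (fields : List String) : Int × List String :=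
  if h : pos < rest.length then
    let cont := pyCat "*" (PySem.Int.toStr u)
    chunkLoopB rest (pos + 4) (u + 1) (fields ++ cont :: cont :: (rest.drop pos).take 4)
  else (u, fields)
termination_by rest.length - pos

-- `while i < len(fields): line = fields[i].ljust(8); for f in fields[i+1:i+6]: line += f.ljust(16); …`
def groupLoopB (fields : List String) (i : Nat) (final : List String) : List String :=
  if h : i < fields.length then
    let line := ((fields.drop (i + 1)).take 5).foldl (fun a f => pyCat a (pyLjust f 16))
                  (pyLjust (fields.getD i "") 8)
    groupLoopB fields (i + 6) (final ++ [line])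
  else final
termination_by fields.length - i

def items_to_long_form_py_alt (items : List String) (unique_int : Int) : Int × List String :=
  let i0 := items.headD ""                                   -- items[0]; [] raises IndexError, excluded by Pre_
  let head := if PySem.Str.isIn "*" i0 then i0 else pyCat (PySem.Str.strip i0) "*"
  let rest := stripTrail items.tail
  let r := chunkLoopB rest 4 unique_int (head :: rest.take 4)
  (r.1, groupLoopB r.2 0 [])

-- ===== PRECONDITION & SPEC =====
-- Pre_ excludes only the empty list, on which both Pythons raise IndexError at items[0].
def Pre_items_to_long_form_py (items : List String) (unique_int : Int) : Prop := items ≠ []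
instance (items : List String) (unique_int : Int) : Decidable (Pre_items_to_long_form_py items unique_int) := by unfold Pre_items_to_long_form_py; infer_instance
def pvWitness_items_to_long_form_py : List String × Int := (["GRID", "1", "2", "3", "4", "5"], 7)

def Spec_items_to_long_form_py (items : List String) (unique_int : Int) (out : Int × List String) : Prop := out = items_to_long_form_py_alt items unique_int
instance (items : List String) (unique_int : Int) (out : Int × List String) : Decidable (Spec_items_to_long_form_py items unique_int out) := by unfold Spec_items_to_long_form_py; infer_instance

-- ===== CLAIM (what is proved, stated in full; the proofs are below) =====
def Claim_equal_items_to_long_form_py : Prop := ∀ (items : List String) (unique_int : Int), Dom_items_to_long_form_py items unique_int → Pre_items_to_long_form_py items unique_int → Spec_items_to_long_form_py items unique_int (items_to_long_form_py items unique_int)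

-- ===== LEMMAS AND PROOFS =====

-- proof-only helper: both chunk loops restated as structural recursion on the remaining list
def chunkStruct (xs : List String) (u : Int) (fields : List String) : Int × List String :=
  if h : xs = [] then (u, fields)
  else
    chunkStruct (xs.drop 4) (u + 1)
      (fields ++ pyCat "*" (PySem.Int.toStr u) :: pyCat "*" (PySem.Int.toStr u) :: xs.take 4)
termination_by xs.length
decreasing_by
  have : 0 < xs.length := List.length_pos_of_ne_nil h
  simp [List.length_drop]; omega

theorem stripTrail_nil : stripTrail [] = [] := by rw [stripTrail]; rfl

theorem stripTrail_ne_nil (xs : List String) (hne : xs ≠ []) :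
    stripTrail xs = if xs.getLast hne = "" then stripTrail xs.dropLast else xs := by
  rw [stripTrail, dif_neg hne]

-- trailing-"" stripping commutes with a nonempty head
theorem stripTrail_cons_key : ∀ (n : Nat) (t : List String), t.length ≤ n → ∀ (h : String), h ≠ "" →
    stripTrail (h :: t) = h :: stripTrail t := by
  intro n
  induction n with
  | zero =>
    intro t ht h hh
    have : t = [] := List.eq_nil_of_length_eq_zero (by omega)
    subst this
    rw [stripTrail_ne_nil [h] (by simp), stripTrail_nil]
    simp [hh]
  | succ n ih =>
    intro t ht h hh
    rcases eq_or_ne t [] with rfl | htne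
    · rw [stripTrail_ne_nil [h] (by simp), stripTrail_nil]
      simp [hh]
    · rw [stripTrail_ne_nil (h :: t) (by simp), List.getLast_cons htne,
        stripTrail_ne_nil t htne]
      by_cases hl : t.getLast htne = ""
      · rw [if_pos hl, if_pos hl, List.dropLast_cons_of_ne_nil htne]
        exact ih t.dropLast (by simp [List.length_dropLast]; omega) h hh
      · rw [if_neg hl, if_neg hl]

-- the in-place insertion loop of A equals the structural chunk recursion
theorem insLoopA_eq_chunk : ∀ (n : Nat) (tail : List String), tail.length ≤ n →
    ∀ (pre : List String) (u : Int),
    insLoopA (pre ++ tail) pre.length u = chunkStruct (tail.drop 4) u (pre ++ tail.take 4) := by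
  intro n
  induction n with
  | zero =>
    intro tail ht pre u
    have : tail = [] := List.eq_nil_of_length_eq_zero (by omega)
    subst this
    rw [insLoopA, chunkStruct]
    simp
  | succ n ih =>
    intro tail ht pre u
    by_cases hc : 4 < tail.length
    · have hlen : pre.length + 4 < (pre ++ tail).length := by simp; omega
      rw [insLoopA, dif_pos hlen]
      have htk4 : (tail.take 4).length = 4 := by simp; omega
      have e1 : PySem.List.insert (pre ++ tail) ((pre.length + 4 : Nat) : Int)
          (pyCat "*" (PySem.Int.toStr u))
          = (pre ++ tail.take 4) ++ pyCat "*" (PySem.Int.toStr u) :: tail.drop 4 := by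
        rw [PySem.List.insert_natCast _ _ _ (by simp; omega)]
        rw [List.take_append, List.drop_append]
        rw [List.take_of_length_le (by omega), List.drop_eq_nil_of_le (by omega)]
        simp
      simp only [e1]
      have hl2 : ((pre ++ tail.take 4) : List String).length = pre.length + 4 := by
        simp [htk4]
      have e2 : PySem.List.insert
          ((pre ++ tail.take 4) ++ pyCat "*" (PySem.Int.toStr u) :: tail.drop 4)
          ((pre.length + 4 : Nat) : Int) (pyCat "*" (PySem.Int.toStr u))
          = (pre ++ tail.take 4) ++ pyCat "*" (PySem.Int.toStr u)
              :: pyCat "*" (PySem.Int.toStr u) :: tail.drop 4 := by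
        rw [PySem.List.insert_natCast _ _ _ (by simp [hl2]; omega)]
        rw [List.take_append, List.drop_append]
        rw [List.take_of_length_le hl2.le, List.drop_eq_nil_of_le hl2.le]
        simp [hl2]
      simp only [e2]
      have hpre' : ((pre ++ tail.take 4) ++
          [pyCat "*" (PySem.Int.toStr u), pyCat "*" (PySem.Int.toStr u)]).length
          = pre.length + 6 := by simp [htk4]
      have hrec := ih (tail.drop 4) (by simp [List.length_drop]; omega)
        ((pre ++ tail.take 4) ++
          [pyCat "*" (PySem.Int.toStr u), pyCat "*" (PySem.Int.toStr u)]) (u + 1)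
      rw [hpre'] at hrec
      have hlist : ((pre ++ tail.take 4) ++
          [pyCat "*" (PySem.Int.toStr u), pyCat "*" (PySem.Int.toStr u)]) ++ tail.drop 4
          = (pre ++ tail.take 4) ++ pyCat "*" (PySem.Int.toStr u)
              :: pyCat "*" (PySem.Int.toStr u) :: tail.drop 4 := by
        simp
      rw [hlist] at hrec
      rw [hrec]
      have hdne : tail.drop 4 ≠ [] := by
        intro h
        have := congrArg List.length h
        simp [List.length_drop] at this; omega
      conv_rhs => rw [chunkStruct]
      rw [dif_neg hdne]
      simp
    · rw [insLoopA, chunkStruct]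
      have h1 : ¬ pre.length + 4 < (pre ++ tail).length := by simp; omega
      rw [dif_neg h1, dif_pos (List.drop_eq_nil_of_le (by omega : tail.length ≤ 4))]
      rw [List.take_of_length_le (by omega : tail.length ≤ 4)]

-- B's index loop equals the same structural chunk recursion
theorem chunkLoopB_eq_struct_key : ∀ (n : Nat) (rest : List String) (pos : Nat),
    rest.length - pos ≤ n → ∀ (u : Int) (fields : List String),
    chunkLoopB rest pos u fields = chunkStruct (rest.drop pos) u fields := by
  intro n
  induction n with
  | zero =>
    intro rest pos hp u fields
    rw [chunkLoopB, dif_neg (by omega : ¬ pos < rest.length),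
      chunkStruct, dif_pos (List.drop_eq_nil_of_le (by omega : rest.length ≤ pos))]
  | succ n ih =>
    intro rest pos hp u fields
    by_cases hc : pos < rest.length
    · have hne : rest.drop pos ≠ [] := by
        intro h
        have := congrArg List.length h
        simp [List.length_drop] at this; omega
      rw [chunkLoopB, dif_pos hc, chunkStruct, dif_neg hne]
      rw [ih rest (pos + 4) (by omega) (u + 1)]
      rw [List.drop_drop]
    · rw [chunkLoopB, dif_neg hc,
        chunkStruct, dif_pos (List.drop_eq_nil_of_le (by omega : rest.length ≤ pos))]

theorem chunkLoopB_eq_struct (rest : List String) (pos : Nat) (u : Int) (fields : List String) :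
    chunkLoopB rest pos u fields = chunkStruct (rest.drop pos) u fields :=
  chunkLoopB_eq_struct_key (rest.length - pos) rest pos le_rfl u fields

-- a run of ≤ 5 fields whose indices are not ≡ 0 (mod 6) extends the current line
theorem grpPart : ∀ (bs : List String) (j : Nat) (a : List String) (s : String),
    (∀ m, m < bs.length → (j + m) % 6 ≠ 0) →
    List.foldl (fun st it => (st.1 + 1, finStepA st.2 st.1 it)) (j, a ++ [s]) bs
      = (j + bs.length, a ++ [bs.foldl (fun x y => pyCat x (pyLjust y 16)) s]) := by
  intro bs
  induction bs with
  | nil => intro j a s _; simp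
  | cons b bs ih =>
    intro j a s hm
    have h0 : ¬ j % 6 = 0 := by have := hm 0 (by simp); simpa using this
    simp only [List.foldl_cons]
    have hstep : finStepA (a ++ [s]) j b = a ++ [pyCat s (pyLjust b 16)] := by
      simp [finStepA, h0, List.dropLast_concat, List.getLastD_concat]
    rw [hstep]
    rw [ih (j + 1) a (pyCat s (pyLjust b 16)) (by
      intro m hmb
      have := hm (m + 1) (by simp; omega)
      simpa [show j + 1 + m = j + (m + 1) by omega] using this)]
    simp [Prod.ext_iff]
    omega

-- A's enumerate/mod-6 fold from a multiple-of-6 position equals B's per-line loop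
theorem grpMain : ∀ (n : Nat) (fields : List String) (k : Nat), fields.length - k ≤ n →
    k % 6 = 0 → ∀ (acc : List String),
    (List.foldl (fun st it => (st.1 + 1, finStepA st.2 st.1 it)) (k, acc) (fields.drop k)).2
      = groupLoopB fields k acc := by
  intro n
  induction n with
  | zero =>
    intro fields k hk hk6 acc
    rw [groupLoopB, dif_neg (by omega : ¬ k < fields.length),
      List.drop_eq_nil_of_le (by omega : fields.length ≤ k)]
    rfl
  | succ n ih =>
    intro fields k hk hk6 acc
    by_cases hc : k < fields.length
    · rw [List.drop_eq_getElem_cons hc]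
      simp only [List.foldl_cons]
      have hstep : finStepA acc k fields[k] = acc ++ [pyLjust fields[k] 8] := by
        simp [finStepA, hk6]
      rw [hstep]
      have hsplit : fields.drop (k + 1)
          = (fields.drop (k + 1)).take 5 ++ fields.drop (k + 6) := by
        conv_lhs => rw [← List.take_append_drop 5 (fields.drop (k + 1))]
        rw [List.drop_drop]
      rw [hsplit, List.foldl_append]
      rw [grpPart ((fields.drop (k + 1)).take 5) (k + 1) acc (pyLjust fields[k] 8) (by
        intro m hmb
        have hm5 : m < 5 := lt_of_lt_of_le hmb (by simp [List.length_take])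
        omega)]
      rw [groupLoopB, dif_pos hc]
      have hgetD : fields.getD k "" = fields[k] := List.getD_eq_getElem fields "" hc
      rw [hgetD]
      by_cases h6 : k + 6 ≤ fields.length
      · have hbl : ((fields.drop (k + 1)).take 5).length = 5 := by
          simp [List.length_take, List.length_drop]; omega
        rw [hbl, (by omega : k + 1 + 5 = k + 6)]
        exact ih fields (k + 6) (by omega) (by omega) (acc ++ [_])
      · rw [List.drop_eq_nil_of_le (by omega : fields.length ≤ k + 6)]
        simp only [List.foldl_nil]
        rw [groupLoopB, dif_neg (by omega : ¬ k + 6 < fields.length)]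
    · rw [groupLoopB, dif_neg hc,
        List.drop_eq_nil_of_le (by omega : fields.length ≤ k)]
      rfl

theorem stripTrail_cons (h : String) (t : List String) (hh : h ≠ "") :
    stripTrail (h :: t) = h :: stripTrail t :=
  stripTrail_cons_key t.length t le_rfl h hh

theorem finLoopA_eq_group (fields : List String) :
    finLoopA fields = groupLoopB fields 0 [] := by
  have := grpMain fields.length fields 0 (by omega) (by omega) []
  simpa [finLoopA] using this

theorem pyCat_star_ne_empty (s : String) : pyCat s "*" ≠ "" := by
  intro h
  have h5 := congrArg String.toList h
  rw [pyCat, String.toList_ofList,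
    show ("" : String).toList = ([] : List Char) from by decide] at h5
  exact List.cons_ne_nil '*' [] (List.append_eq_nil_iff.mp h5).2

theorem isIn_star_ne_empty (s : String) (hin : PySem.Str.isIn "*" s = true) : s ≠ "" := by
  intro h
  subst h
  exact absurd hin (by decide)

-- ===== VERDICT (by name: the statement is the Claim_ definition above) =====
theorem items_to_long_form_py_spec : Claim_equal_items_to_long_form_py := by
  intro items u _ _
  show items_to_long_form_py items u = items_to_long_form_py_alt items u
  simp only [items_to_long_form_py, items_to_long_form_py_alt]
  set i0 := items.headD "" with hi0
  set head := if PySem.Str.isIn "*" i0 then i0 else pyCat (PySem.Str.strip i0) "*" with hhead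
  have hne : head ≠ "" := by
    rw [hhead]
    by_cases hin : PySem.Str.isIn "*" i0
    · rw [if_pos hin]
      exact isIn_star_ne_empty i0 hin
    · rw [if_neg hin]
      exact pyCat_star_ne_empty _
  rw [stripTrail_cons head items.tail hne]
  have h1 : insLoopA (head :: stripTrail items.tail) 1 u
      = chunkStruct ((stripTrail items.tail).drop 4) u
          (head :: (stripTrail items.tail).take 4) := by
    have := insLoopA_eq_chunk (stripTrail items.tail).length (stripTrail items.tail)
      le_rfl [head] u
    simpa using this
  rw [h1, chunkLoopB_eq_struct]
  rw [finLoopA_eq_group]
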